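-- pv_equiv track=rewrite | github.com/terry-an-investor/repo-governance-kernel | kernel/assemble_context.py | parse_bullet_list
-- ===== SOURCE A (Python) =====
-- def parse_bullet_list(text: str) -> list[str]:
--     items: list[str] = []
--     current_lines: list[str] = []
--     for raw_line in text.splitlines():
--         line = raw_line.rstrip()
--         stripped = line.strip()
--         if stripped.startswith("- "):
--             if current_lines:
--                 items.append("\n".join(current_lines).strip())
--             current_lines = [stripped[2:].strip()]
--             continue
--         if current_lines and stripped:
--             current_lines.append(stripped)
--     if current_lines:
--         items.append("\n".join(current_lines).strip())
--     return items
-- ===== SOURCE B (Python) =====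
-- def parse_bullet_list(text: str) -> list[str]:
--     stripped = [line.rstrip().strip() for line in text.splitlines()]
--     n = len(stripped)
--     items: list[str] = []
--     i = 0
--     while i < n and not stripped[i].startswith("- "):
--         i += 1  # discard everything before the first bullet
--     while i < n:
--         j = i + 1
--         while j < n and not stripped[j].startswith("- "):
--             j += 1
--         pieces = [stripped[i][2:].strip()] + [s for s in stripped[i + 1:j] if s]
--         items.append("\n".join(pieces).strip())
--         i = j
--     return items
-- ===== Notes on version B (the rewrite author's own statement) =====
-- stated objective: alternative
-- what changed: Replaces A's single accumulating state-machine pass (items + current_lines mutated per line) by a boundary/segment decomposition: strip all lines, skip to the first bullet, then repeatedly scan each bullet's segment up to the next bullet and build its item from the payload plus the non-empty continuation lines.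
import Mathlib
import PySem

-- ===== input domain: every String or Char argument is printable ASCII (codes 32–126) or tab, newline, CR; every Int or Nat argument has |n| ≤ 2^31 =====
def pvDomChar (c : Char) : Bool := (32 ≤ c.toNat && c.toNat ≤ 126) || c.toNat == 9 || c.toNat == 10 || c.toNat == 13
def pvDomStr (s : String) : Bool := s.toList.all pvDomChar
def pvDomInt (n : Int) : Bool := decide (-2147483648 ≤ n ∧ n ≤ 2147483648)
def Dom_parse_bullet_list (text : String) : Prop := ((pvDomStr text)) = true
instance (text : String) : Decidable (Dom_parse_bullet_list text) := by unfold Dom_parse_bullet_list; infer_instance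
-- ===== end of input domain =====

-- B replaces A's single accumulating state-machine pass by a boundary/segment decomposition:
-- drop the lines before the first bullet, then consume one bullet segment at a time (simpler, same cost).

-- ===== PORT A =====
-- per-line normalisation both Pythons perform: line.rstrip() then .strip()
def pbStripLine (raw : String) : String :=
  PySem.Str.strip (PySem.Str.rstrip raw)

-- A's "if current_lines: items.append('\n'.join(current_lines).strip())"
def pbFlush (st : List String × List String) : List String :=
  if st.2 ≠ [] then st.1 ++ [PySem.Str.strip (PySem.Str.join "\n" st.2)] else st.1

-- A's loop body over the state (items, current_lines)
def pbStep (st : List String × List String) (raw_line : String) : List String × List String :=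
  let stripped := pbStripLine raw_line
  if PySem.Str.startswith stripped "- " then
    (pbFlush st, [PySem.Str.strip (PySem.Str.slice stripped (some 2) none)])
  else if st.2 ≠ [] ∧ stripped ≠ "" then
    (st.1, st.2 ++ [stripped])
  else st

def parse_bullet_list (text : String) : List String :=
  pbFlush ((PySem.Str.splitlines text).foldl pbStep ([], []))

-- ===== PORT B =====
def pbNotBullet (s : String) : Bool := !(PySem.Str.startswith s "- ")

-- one segment: the bullet line's payload followed by its non-empty continuation lines, joined and stripped
def pbItem (head : String) (body : List String) : String :=
  PySem.Str.strip (PySem.Str.join "\n"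
    (PySem.Str.strip (PySem.Str.slice head (some 2) none) :: body))

-- B's outer while-loop: each iteration consumes one segment (bullet line + scan to the next bullet)
def pbGo : List String → List String
  | [] => []
  | h :: t =>
    pbItem h ((t.takeWhile pbNotBullet).filter (fun s => s ≠ "")) ::
      pbGo (t.dropWhile pbNotBullet)
termination_by ls => ls.length
decreasing_by simp only [List.length_cons]; exact Nat.lt_succ_of_le (t.length_dropWhile_le _)

def parse_bullet_list_alt (text : String) : List String :=
  pbGo (((PySem.Str.splitlines text).map pbStripLine).dropWhile pbNotBullet)

-- ===== PRECONDITION & SPEC =====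
def Spec_parse_bullet_list (text : String) (out : List String) : Prop := out = parse_bullet_list_alt text
instance (text : String) (out : List String) : Decidable (Spec_parse_bullet_list text out) := by unfold Spec_parse_bullet_list; infer_instance

-- ===== CLAIM (what is proved, stated in full; the proofs are below) =====
def Claim_equal_parse_bullet_list : Prop := ∀ (text : String), Dom_parse_bullet_list text → Spec_parse_bullet_list text (parse_bullet_list text)

-- ===== LEMMAS AND PROOFS =====

-- A's loop body fed the already-stripped line (proof-side view of pbStep)
def pbStep' (st : List String × List String) (s : String) : List String × List String :=
  if PySem.Str.startswith s "- " then
    (pbFlush st, [PySem.Str.strip (PySem.Str.slice s (some 2) none)])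
  else if st.2 ≠ [] ∧ s ≠ "" then
    (st.1, st.2 ++ [s])
  else st

-- the fold from a non-empty current block produces: that block (extended by the continuation
-- lines up to the next bullet) as one item, then B's segments of the rest
theorem pb_fold_cur (s : List String) (items cur : List String) (hcur : cur ≠ []) :
    pbFlush (s.foldl pbStep' (items, cur)) =
      items ++ (PySem.Str.strip (PySem.Str.join "\n"
          (cur ++ (s.takeWhile pbNotBullet).filter (fun x => x ≠ ""))) ::
        pbGo (s.dropWhile pbNotBullet)) := by
  induction s generalizing items cur with
  | nil =>
    simp [pbFlush, hcur, pbGo]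
  | cons h t ih =>
    by_cases hb : PySem.Chars.startswith h.toList ['-', ' '] = true
    · have hnb : pbNotBullet h = false := by simp [pbNotBullet, hb]
      rw [List.foldl_cons]
      have hstep : pbStep' (items, cur) h =
          (items ++ [PySem.Str.strip (PySem.Str.join "\n" cur)],
           [PySem.Str.strip (PySem.Str.slice h (some 2) none)]) := by
        simp [pbStep', hb, pbFlush, hcur]
      rw [hstep, ih _ _ (by simp)]
      rw [List.takeWhile_cons_of_neg (by simp [hnb]), List.dropWhile_cons_of_neg (by simp [hnb])]
      rw [pbGo]
      simp [pbItem, List.append_assoc]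
    · have hnb : pbNotBullet h = true := by simp [pbNotBullet, hb]
      rw [List.foldl_cons]
      rw [List.takeWhile_cons_of_pos hnb, List.dropWhile_cons_of_pos hnb]
      by_cases he : h = ""
      · have hstep : pbStep' (items, cur) h = (items, cur) := by
          simp [pbStep', he, show PySem.Chars.startswith ([] : List Char) ['-', ' '] = false from rfl]
        rw [hstep, ih _ _ hcur]
        simp [he]
      · have hstep : pbStep' (items, cur) h = (items, cur ++ [h]) := by
          simp [pbStep', hb, hcur, he]
        rw [hstep, ih _ _ (by simp [hcur])]
        simp [he, List.append_assoc]

-- the fold from the initial empty block produces exactly B's segments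
theorem pb_fold_nil (s : List String) (items : List String) :
    pbFlush (s.foldl pbStep' (items, [])) = items ++ pbGo (s.dropWhile pbNotBullet) := by
  induction s generalizing items with
  | nil => simp [pbFlush, pbGo]
  | cons h t ih =>
    by_cases hb : PySem.Chars.startswith h.toList ['-', ' '] = true
    · have hnb : pbNotBullet h = false := by simp [pbNotBullet, hb]
      rw [List.foldl_cons]
      have hstep : pbStep' (items, []) h =
          (items, [PySem.Str.strip (PySem.Str.slice h (some 2) none)]) := by
        simp [pbStep', hb, pbFlush]
      rw [hstep, pb_fold_cur _ _ _ (by simp)]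
      rw [List.dropWhile_cons_of_neg (by simp [hnb])]
      rw [pbGo]
      simp [pbItem]
    · have hnb : pbNotBullet h = true := by simp [pbNotBullet, hb]
      rw [List.foldl_cons]
      have hstep : pbStep' (items, []) h = (items, []) := by
        simp [pbStep', hb]
      rw [hstep, ih]
      rw [List.dropWhile_cons_of_pos hnb]

-- ===== VERDICT (by name: the statement is the Claim_ definition above) =====
theorem parse_bullet_list_spec : Claim_equal_parse_bullet_list := by
  intro text _
  unfold Spec_parse_bullet_list parse_bullet_list parse_bullet_list_alt
  have : (PySem.Str.splitlines text).foldl pbStep ([], []) =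
      ((PySem.Str.splitlines text).map pbStripLine).foldl pbStep' ([], []) := by
    rw [List.foldl_map]
    rfl
  rw [this, pb_fold_nil]
  simp
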